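-- pv_equiv track=rewrite | github.com/walidchatila/Bioinformatics_Algorithims | splc.py | intron_remover
-- ===== SOURCE A (Python) =====
-- def intron_remover(input_seq, introns):
--     seq, st, lt, exons = str(input_seq), 0, 0, []
--     for i in introns:
--         #print i
--         st = i[0]
--         exons.append(seq[lt:st])
--         lt = i[1]
--     exons.append(seq[lt:])
--     return "".join(exons)
-- ===== SOURCE B (Python) =====
-- def intron_remover(input_seq, introns):
--     seq = str(input_seq)
--     introns = list(introns)
--
--     def piece(k, lt):
--         # suffix of the result covering seq[lt:] with introns[k:] removed
--         if k == len(introns):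
--             return seq[lt:]
--         start, end = introns[k]
--         return seq[lt:start] + piece(k + 1, end)
--
--     return piece(0, 0)
-- ===== Notes on version B (the rewrite author's own statement) =====
-- stated objective: alternative
-- what changed: Replaces A's iterative loop that accumulates an exon list and joins it at the end with a direct recursion on the intron list that concatenates each exon slice onto the recursively-built suffix (no accumulator list, no join).
import Mathlib
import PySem

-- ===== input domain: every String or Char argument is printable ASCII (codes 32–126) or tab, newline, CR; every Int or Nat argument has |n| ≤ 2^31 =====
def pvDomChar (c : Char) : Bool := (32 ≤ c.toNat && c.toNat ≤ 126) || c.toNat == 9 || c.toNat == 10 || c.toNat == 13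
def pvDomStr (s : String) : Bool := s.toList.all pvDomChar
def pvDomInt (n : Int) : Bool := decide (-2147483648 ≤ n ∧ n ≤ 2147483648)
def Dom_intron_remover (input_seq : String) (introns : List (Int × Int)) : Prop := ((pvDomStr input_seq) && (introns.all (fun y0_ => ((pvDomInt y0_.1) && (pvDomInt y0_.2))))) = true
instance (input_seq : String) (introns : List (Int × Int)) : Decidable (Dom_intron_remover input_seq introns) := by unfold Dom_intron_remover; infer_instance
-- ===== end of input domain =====

-- B replaces A's accumulate-exons-then-join loop with a direct recursion over the
-- intron list that concatenates each exon slice onto the recursively-built suffix;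
-- same cost, different decomposition.


-- ===== PORT A =====
def intron_remover (input_seq : String) (introns : List (Int × Int)) : String :=
  let seq := input_seq
  let r : Int × List String := introns.foldl
    (fun (acc : Int × List String) i =>
      (i.2, acc.2 ++ [PySem.Str.slice seq (some acc.1) (some i.1)]))
    (0, [])
  PySem.Str.join "" (r.2 ++ [PySem.Str.slice seq (some r.1) none])

-- ===== PORT B =====
-- piece(k, lt): recursion on the remaining intron list, concatenating the exon
-- slice seq[lt:start] onto the recursively-built suffix.
def intronPiece (seq : String) (lt : Int) : List (Int × Int) → String
  | [] => PySem.Str.slice seq (some lt) none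
  | (start, stop) :: rest =>
      PySem.Str.slice seq (some lt) (some start) ++ intronPiece seq stop rest

def intron_remover_alt (input_seq : String) (introns : List (Int × Int)) : String :=
  intronPiece input_seq 0 introns

-- ===== PRECONDITION & SPEC =====
def Spec_intron_remover (input_seq : String) (introns : List (Int × Int)) (out : String) : Prop := out = intron_remover_alt input_seq introns
instance (input_seq : String) (introns : List (Int × Int)) (out : String) : Decidable (Spec_intron_remover input_seq introns out) := by unfold Spec_intron_remover; infer_instance

-- ===== CLAIM (what is proved, stated in full; the proofs are below) =====
def Claim_equal_intron_remover : Prop := ∀ (input_seq : String) (introns : List (Int × Int)), Dom_intron_remover input_seq introns → Spec_intron_remover input_seq introns (intron_remover input_seq introns)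

-- ===== LEMMAS AND PROOFS =====

theorem join_nil_cons (x : String) (xs : List String) :
    PySem.Str.join "" (x :: xs) = x ++ PySem.Str.join "" xs := by
  simp [PySem.Str.join, PySem.Chars.join, List.intercalate]
  cases xs <;> simp

theorem join_nil_nil : PySem.Str.join "" ([] : List String) = "" := by
  simp [PySem.Str.join, PySem.Chars.join, List.intercalate]

theorem join_append_singleton (x : String) (a : List String) :
    PySem.Str.join "" (a ++ [x]) = PySem.Str.join "" a ++ x := by
  induction a with
  | nil => simp [join_nil_cons, join_nil_nil]
  | cons y ys ihy => simp only [List.cons_append, join_nil_cons, ihy, String.append_assoc]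

-- A's folded exon list (plus the tail slice), joined, equals B's recursion,
-- generalized over the running lower bound `lt` and the accumulated exon list.
theorem foldl_join_eq_piece (seq : String) (introns : List (Int × Int)) :
    ∀ (lt : Int) (acc : List String),
      PySem.Str.join ""
        ((introns.foldl
            (fun (a : Int × List String) i =>
              (i.2, a.2 ++ [PySem.Str.slice seq (some a.1) (some i.1)])) (lt, acc)).2 ++
          [PySem.Str.slice seq
            (some (introns.foldl
              (fun (a : Int × List String) i =>
                (i.2, a.2 ++ [PySem.Str.slice seq (some a.1) (some i.1)])) (lt, acc)).1) none])
      = PySem.Str.join "" acc ++ intronPiece seq lt introns := by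
  induction introns with
  | nil =>
      intro lt acc
      simp [intronPiece, join_append_singleton]
  | cons p rest ih =>
      intro lt acc
      simp only [List.foldl_cons]
      rw [ih p.2 (acc ++ [PySem.Str.slice seq (some lt) (some p.1)])]
      rw [join_append_singleton]
      cases p with
      | mk a b => simp [intronPiece, String.append_assoc]

-- ===== VERDICT (by name: the statement is the Claim_ definition above) =====
theorem intron_remover_spec : Claim_equal_intron_remover := by
  intro input_seq introns _
  unfold Spec_intron_remover intron_remover intron_remover_alt
  rw [foldl_join_eq_piece input_seq introns 0 []]
  simp [join_nil_nil]
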